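-- pv_equiv track=rewrite | github.com/jasper-tech-global/JasperTgBulk | scripts/init_keys.py | build_env
-- ===== SOURCE A (Python) =====
-- def build_env(existing: dict[str, str]) -> str:
--     lines = []
--     keys_order = [
--         "DATABASE_URL",
--         "TELEGRAM_BOT_TOKEN",
--         "SECRET_KEY",
--         "FERNET_KEY",
--         "ADMIN_USERNAME",
--         "ADMIN_PASSWORD",
--         "APP_HOST",
--         "APP_PORT",
--     ]
--     for k in keys_order:
--         if k in existing:
--             lines.append(f"{k}={existing[k]}")
--     for k, v in existing.items():
--         if k not in keys_order:
--             lines.append(f"{k}={v}")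
--     return "\n".join(lines) + "\n"
-- ===== SOURCE B (Python) =====
-- def build_env(existing: dict[str, str]) -> str:
--     keys_order = [
--         "DATABASE_URL",
--         "TELEGRAM_BOT_TOKEN",
--         "SECRET_KEY",
--         "FERNET_KEY",
--         "ADMIN_USERNAME",
--         "ADMIN_PASSWORD",
--         "APP_HOST",
--         "APP_PORT",
--     ]
--     order = {k: i for i, k in enumerate(keys_order)}
--     items = sorted(existing.items(), key=lambda kv: order.get(kv[0], len(keys_order)))
--     return "\n".join(f"{k}={v}" for k, v in items) + "\n"
-- ===== Notes on version B (the rewrite author's own statement) =====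
-- stated objective: alternative
-- what changed: A's two passes (scan the 8 canonical keys against the dict, then scan the dict against the 8-key list) are replaced by building a key->priority index once and emitting the pairs in one stable sort by that priority, non-canonical keys sharing the sentinel priority 8 so they keep insertion order.
import Mathlib
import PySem

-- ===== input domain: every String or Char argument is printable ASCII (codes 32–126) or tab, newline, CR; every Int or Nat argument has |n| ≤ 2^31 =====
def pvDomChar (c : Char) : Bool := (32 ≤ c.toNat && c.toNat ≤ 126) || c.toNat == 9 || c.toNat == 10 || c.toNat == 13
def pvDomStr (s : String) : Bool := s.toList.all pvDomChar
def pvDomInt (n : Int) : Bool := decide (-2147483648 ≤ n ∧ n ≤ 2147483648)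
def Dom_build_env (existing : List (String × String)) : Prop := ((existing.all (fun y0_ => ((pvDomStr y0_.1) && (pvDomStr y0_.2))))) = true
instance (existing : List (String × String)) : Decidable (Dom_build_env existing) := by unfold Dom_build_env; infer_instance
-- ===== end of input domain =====

-- B replaces A's two membership-scanning passes by a priority index built once plus a single stable sort; alternative, not claimed faster.

-- ===== PORT A =====
def pvKeysOrder : List String :=
  ["DATABASE_URL", "TELEGRAM_BOT_TOKEN", "SECRET_KEY", "FERNET_KEY",
   "ADMIN_USERNAME", "ADMIN_PASSWORD", "APP_HOST", "APP_PORT"]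

def build_env (existing : List (String × String)) : String :=
  -- for k in keys_order: if k in existing: lines.append(f"{k}={existing[k]}")
  let lines := pvKeysOrder.foldl (fun acc k =>
    match List.lookup k existing with
    | some v => acc ++ [k ++ "=" ++ v]
    | none => acc) ([] : List String)
  -- for k, v in existing.items(): if k not in keys_order: lines.append(f"{k}={v}")
  let lines := existing.foldl (fun acc kv =>
    if pvKeysOrder.contains kv.1 then acc else acc ++ [kv.1 ++ "=" ++ kv.2]) lines
  PySem.Str.join "\n" lines ++ "\n"

-- ===== PORT B =====
-- order = {k: i for i, k in enumerate(keys_order)}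
def pvOrder : PySem.Dict String Int :=
  PySem.Dict.ofList ((PySem.List.enumerate pvKeysOrder).map (fun p => (p.2, p.1)))

def build_env_alt (existing : List (String × String)) : String :=
  let items := PySem.List.sorted existing
    (fun kv => PySem.Dict.getD pvOrder kv.1 (pvKeysOrder.length : Int))
  PySem.Str.join "\n" (items.map (fun kv => kv.1 ++ "=" ++ kv.2)) ++ "\n"

-- ===== PRECONDITION & SPEC =====
-- Pre_ excludes association lists with duplicate keys: they do not represent a Python dict
-- (the argument's declared type dict[str, str], whose keys are always distinct).
def Pre_build_env (existing : List (String × String)) : Prop :=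
  (existing.map Prod.fst).Nodup
instance (existing : List (String × String)) : Decidable (Pre_build_env existing) := by
  unfold Pre_build_env; infer_instance

def pvWitness_build_env : (List (String × String)) :=
  [("APP_PORT", "8000"), ("EXTRA", "1"), ("DATABASE_URL", "sqlite://")]

def Spec_build_env (existing : List (String × String)) (out : String) : Prop := out = build_env_alt existing
instance (existing : List (String × String)) (out : String) : Decidable (Spec_build_env existing out) := by unfold Spec_build_env; infer_instance

-- ===== CLAIM (what is proved, stated in full; the proofs are below) =====
def Claim_equal_build_env : Prop := ∀ (existing : List (String × String)), Dom_build_env existing → Pre_build_env existing → Spec_build_env existing (build_env existing)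

-- ===== LEMMAS AND PROOFS =====

-- the priority B's sort key computes, written as an if-chain over the eight canonical keys
def pvIdx (k : String) : Int :=
  if k = "DATABASE_URL" then 0 else if k = "TELEGRAM_BOT_TOKEN" then 1
  else if k = "SECRET_KEY" then 2 else if k = "FERNET_KEY" then 3
  else if k = "ADMIN_USERNAME" then 4 else if k = "ADMIN_PASSWORD" then 5
  else if k = "APP_HOST" then 6 else if k = "APP_PORT" then 7 else 8

def pvIdxOfKeyList : PySem.Dict String Int := PySem.Dict.mk
  [("DATABASE_URL", 0), ("TELEGRAM_BOT_TOKEN", 1), ("SECRET_KEY", 2), ("FERNET_KEY", 3),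
   ("ADMIN_USERNAME", 4), ("ADMIN_PASSWORD", 5), ("APP_HOST", 6), ("APP_PORT", 7)]

theorem pvOrder_eq : pvOrder = pvIdxOfKeyList := rfl

set_option maxHeartbeats 4000000 in
set_option maxRecDepth 10000 in
theorem pv_getD_eval (k : String) :
    PySem.Dict.getD pvOrder k (pvKeysOrder.length : Int) = pvIdx k := by
  rw [pvOrder_eq]
  simp only [pvIdxOfKeyList, PySem.Dict.getD, PySem.Dict.get?_mk_cons, pvIdx, pvKeysOrder]
  split_ifs <;> simp_all [PySem.Dict.get?, beq_iff_eq]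

-- a stable insertion sort puts x after everything not strictly greater and before everything strictly greater
theorem pv_insertBy_middle {α : Type} (before : α → α → Bool) (x : α) (as bs : List α)
    (ha : ∀ a ∈ as, before x a = false) (hb : ∀ b ∈ bs, before x b = true) :
    PySem.List.insertBy before x (as ++ bs) = as ++ x :: bs := by
  induction as with
  | nil =>
    cases bs with
    | nil => simp [PySem.List.insertBy]
    | cons b bs' => simp [PySem.List.insertBy, hb b (by simp)]
  | cons a as' ih =>
    have hfa : before x a = false := ha a (by simp)
    simp [PySem.List.insertBy, hfa]
    exact ih (fun y hy => ha y (by simp [hy]))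

-- bucket characterization of Python's stable sort: with priorities drawn from the strictly
-- increasing list vs, sorting is concatenating the priority buckets in original order
theorem pv_stable_bucket {α : Type} (p : α → Int) (xs : List α) (vs : List Int)
    (hvs : vs.Pairwise (· < ·)) (hmem : ∀ x ∈ xs, p x ∈ vs) :
    PySem.List.sorted xs p = vs.flatMap (fun v => xs.filter (fun x => p x == v)) := by
  induction xs using List.reverseRecOn with
  | nil => simp [PySem.List.sorted_eq_foldl_insertBy]
  | append_singleton xs x ih =>
    have hx : p x ∈ vs := hmem x (by simp)
    obtain ⟨vs₁, vs₂, rfl⟩ : ∃ l1 l2, vs = l1 ++ p x :: l2 := by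
      obtain ⟨l1, l2, h⟩ := List.append_of_mem hx
      exact ⟨l1, l2, h⟩
    rw [List.pairwise_append] at hvs
    obtain ⟨h1, h2, h12⟩ := hvs
    have ih' := ih (fun y hy => hmem y (by simp [hy]))
    have hs : PySem.List.sorted (xs ++ [x]) p =
        PySem.List.insertBy (fun a b => decide (p a < p b)) x (PySem.List.sorted xs p) := by
      rw [PySem.List.sorted_eq_foldl_insertBy, PySem.List.sorted_eq_foldl_insertBy,
        List.foldl_append]
      rfl
    rw [hs, ih']
    have hbucket : ∀ v : Int, (xs ++ [x]).filter (fun y => p y == v) =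
        xs.filter (fun y => p y == v) ++ (if p x = v then [x] else []) := by
      intro v; rw [List.filter_append]
      by_cases h : p x = v <;> simp [h]
    have hne1 : ∀ v ∈ vs₁, ¬ p x = v := by
      intro v hv; have := h12 v hv (p x) (by simp); omega
    have hne2 : ∀ v ∈ vs₂, ¬ p x = v := by
      intro v hv; have := (List.pairwise_cons.mp h2).1 v hv; omega
    rw [List.flatMap_append, List.flatMap_cons, List.flatMap_append, List.flatMap_cons]
    rw [List.flatMap_congr (l := vs₁) (f := fun v => (xs ++ [x]).filter (fun y => p y == v)) (g := fun v => xs.filter (fun y => p y == v))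
        (fun v hv => by show (xs ++ [x]).filter (fun y => p y == v) = xs.filter (fun y => p y == v); rw [hbucket v, if_neg (hne1 v hv), List.append_nil]),
      List.flatMap_congr (l := vs₂) (f := fun v => (xs ++ [x]).filter (fun y => p y == v)) (g := fun v => xs.filter (fun y => p y == v))
        (fun v hv => by show (xs ++ [x]).filter (fun y => p y == v) = xs.filter (fun y => p y == v); rw [hbucket v, if_neg (hne2 v hv), List.append_nil]),
      hbucket (p x), if_pos rfl]
    have happ : List.flatMap (fun v => xs.filter (fun y => p y == v)) vs₁ ++
        (List.filter (fun y => p y == p x) xs ++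
          List.flatMap (fun v => xs.filter (fun y => p y == v)) vs₂)
        = (List.flatMap (fun v => xs.filter (fun y => p y == v)) vs₁ ++
            List.filter (fun y => p y == p x) xs) ++
          List.flatMap (fun v => xs.filter (fun y => p y == v)) vs₂ := by
      simp [List.append_assoc]
    rw [happ, pv_insertBy_middle]
    · simp [List.append_assoc]
    · intro a hha
      simp only [List.mem_append, List.mem_flatMap, List.mem_filter] at hha
      simp only [decide_eq_false_iff_not, not_lt]
      rcases hha with ⟨v, hv, _, hpa⟩ | ⟨_, hpa⟩
      · have h1 := h12 v hv (p x) (by simp)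
        have : p a = v := by simpa using hpa
        omega
      · have : p a = p x := by simpa using hpa
        omega
    · intro b hhb
      simp only [List.mem_flatMap, List.mem_filter] at hhb
      obtain ⟨v, hv, _, hpb⟩ := hhb
      have h1 := (List.pairwise_cons.mp h2).1 v hv
      have : p b = v := by simpa using hpb
      simp; omega

-- with distinct keys, filtering by one key is the lookup's singleton (or nothing)
theorem pv_filter_key (xs : List (String × String)) (hnd : (xs.map Prod.fst).Nodup) (c : String) :
    xs.filter (fun kv => kv.1 == c) = ((List.lookup c xs).map (fun v => (c, v))).toList := by
  induction xs with
  | nil => simp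
  | cons kv rest ih =>
    simp only [List.map_cons, List.nodup_cons] at hnd
    by_cases h : kv.1 = c
    · have hrest : rest.filter (fun kv => kv.1 == c) = [] := by
        apply List.filter_eq_nil_iff.mpr
        intro y hy hbeq
        exact hnd.1 (h ▸ (by simpa using hbeq) ▸ (List.mem_map_of_mem hy))
      simp [List.lookup, h, hrest]
      exact Prod.ext (by simp [h]) rfl
    · simp only [List.filter_cons, List.lookup]
      have hb : (kv.1 == c) = false := by simpa using h
      have hb' : (c == kv.1) = false := by simpa using fun hh => h hh.symm
      simp [hb, hb']
      exact ih hnd.2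

theorem pv_bucket_lookup (xs : List (String × String)) (hnd : (xs.map Prod.fst).Nodup)
    (i : Int) (c : String) (hc : ∀ k, pvIdx k = i ↔ k = c) :
    xs.filter (fun kv => pvIdx kv.1 == i) = ((List.lookup c xs).map (fun v => (c, v))).toList := by
  rw [← pv_filter_key xs hnd c]
  apply List.filter_congr
  intro kv _
  by_cases h : kv.1 = c
  · simp [h, (hc c).mpr rfl]
  · have : ¬ pvIdx kv.1 = i := fun hh => h ((hc kv.1).mp hh)
    simp [h, this]

theorem pv_map_fmt_toList (c : String) (o : Option String) :
    (((o.map (fun v => (c, v))).toList).map (fun kv : String × String => kv.1 ++ "=" ++ kv.2)) =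
    ((o.map (fun v => c ++ "=" ++ v)).toList) := by
  cases o <;> simp

set_option maxHeartbeats 4000000 in
theorem build_env_spec' (existing : List (String × String))
    (hpre : Pre_build_env existing) : build_env existing = build_env_alt existing := by
  unfold build_env build_env_alt Pre_build_env at *
  -- B's sort key is the if-chain priority pvIdx
  have hkeyfun : (fun kv : String × String => PySem.Dict.getD pvOrder kv.1 (pvKeysOrder.length : Int)) =
      (fun kv : String × String => pvIdx kv.1) := funext (fun kv => pv_getD_eval kv.1)
  -- bucket decomposition of the stable sort
  have hsorted : PySem.List.sorted existing (fun kv => pvIdx kv.1) =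
      ([0, 1, 2, 3, 4, 5, 6, 7, 8] : List Int).flatMap
        (fun v => existing.filter (fun kv => pvIdx kv.1 == v)) := by
    apply pv_stable_bucket
    · decide
    · intro kv _
      unfold pvIdx
      split_ifs <;> simp
  -- A's first loop is the canonical lookups
  have hloop1 : pvKeysOrder.foldl (fun acc k =>
      match List.lookup k existing with
      | some v => acc ++ [k ++ "=" ++ v]
      | none => acc) ([] : List String) =
      pvKeysOrder.flatMap (fun k => ((List.lookup k existing).map (fun v => k ++ "=" ++ v)).toList) := by
    rw [PySem.List.foldl_congr_mem pvKeysOrder _ (fun acc k => acc ++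
        ((List.lookup k existing).map (fun v => k ++ "=" ++ v)).toList) []
      (by intro acc k _; cases h : List.lookup k existing <;> simp [h]),
      PySem.List.foldl_append_eq_flatMap]
    simp
  -- A's second loop appends the non-canonical pairs
  have hloop2 : ∀ init : List String, existing.foldl (fun acc kv =>
      if pvKeysOrder.contains kv.1 then acc else acc ++ [kv.1 ++ "=" ++ kv.2]) init =
      init ++ (existing.filter (fun kv => !(pvKeysOrder.contains kv.1))).map (fun kv => kv.1 ++ "=" ++ kv.2) := by
    intro init
    rw [PySem.List.foldl_congr_mem existing _ (fun acc kv =>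
        if !(pvKeysOrder.contains kv.1) then acc ++ [kv.1 ++ "=" ++ kv.2] else acc) init
      (by intro acc kv _; cases h : pvKeysOrder.contains kv.1 <;> simp [List.contains_eq_mem] at h <;> simp [h])]
    exact PySem.List.foldl_append_if _ _ _ init
  -- the last bucket is the leftover filter
  have hbuck8 : existing.filter (fun kv => pvIdx kv.1 == (8 : Int)) =
      existing.filter (fun kv => !(pvKeysOrder.contains kv.1)) := by
    apply List.filter_congr
    intro kv _
    show (pvIdx kv.1 == (8 : Int)) = !(pvKeysOrder.contains kv.1)
    simp only [pvKeysOrder, pvIdx, List.contains_eq_mem]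
    split_ifs <;> simp_all
  -- per-key canonical buckets
  have hb0 := pv_bucket_lookup existing hpre 0 "DATABASE_URL" (by intro k; unfold pvIdx; split_ifs <;> simp_all)
  have hb1 := pv_bucket_lookup existing hpre 1 "TELEGRAM_BOT_TOKEN" (by intro k; unfold pvIdx; split_ifs <;> simp_all)
  have hb2 := pv_bucket_lookup existing hpre 2 "SECRET_KEY" (by intro k; unfold pvIdx; split_ifs <;> simp_all)
  have hb3 := pv_bucket_lookup existing hpre 3 "FERNET_KEY" (by intro k; unfold pvIdx; split_ifs <;> simp_all)
  have hb4 := pv_bucket_lookup existing hpre 4 "ADMIN_USERNAME" (by intro k; unfold pvIdx; split_ifs <;> simp_all)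
  have hb5 := pv_bucket_lookup existing hpre 5 "ADMIN_PASSWORD" (by intro k; unfold pvIdx; split_ifs <;> simp_all)
  have hb6 := pv_bucket_lookup existing hpre 6 "APP_HOST" (by intro k; unfold pvIdx; split_ifs <;> simp_all)
  have hb7 := pv_bucket_lookup existing hpre 7 "APP_PORT" (by intro k; unfold pvIdx; split_ifs <;> simp_all)
  simp only [hloop1, hloop2, hkeyfun, hsorted]
  congr 2
  simp only [List.flatMap_cons, List.flatMap_nil, pvKeysOrder,
    hb0, hb1, hb2, hb3, hb4, hb5, hb6, hb7, hbuck8,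
    List.map_append, pv_map_fmt_toList, List.append_nil, List.append_assoc]

-- ===== VERDICT (by name: the statement is the Claim_ definition above) =====
theorem build_env_spec : Claim_equal_build_env := by
  intro existing _ hpre
  show build_env existing = build_env_alt existing
  exact build_env_spec' existing hpre
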